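-- pv_equiv track=rewrite | github.com/jcarlosroldan/tuenti-challenge | 9/7/solve.py | min_decomposition
-- ===== SOURCE A (Python) =====
-- def min_decomposition(n, elems, min_e=48, max_e=122):
-- 	remaining = n
-- 	while remaining < min_e * elems: remaining += 2**8
-- 	res = []
-- 	for e in range(elems - 1, -1, -1):
-- 		res.append(min(max_e, remaining - e * min_e))
-- 		remaining -= res[-1]
-- 	if remaining > 0:
-- 		return None
-- 	else:
-- 		return list(reversed(res))
-- ===== SOURCE B (Python) =====
-- def min_decomposition(n, elems, min_e=48, max_e=122):
-- 	low = min_e * elems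
-- 	r = n if n >= low else n + 256 * ((low - n + 255) // 256)
-- 	if elems <= 0:
-- 		return [] if r <= 0 else None
-- 	excess = r - low
-- 	cap = max_e - min_e
-- 	if cap < 0:
-- 		return None
-- 	if cap == 0:
-- 		return [min_e] * elems if excess == 0 else None
-- 	if excess > cap * elems:
-- 		return None
-- 	full, rem = divmod(excess, cap)
-- 	if rem > 0:
-- 		return [min_e] * (elems - full - 1) + [min_e + rem] + [max_e] * full
-- 	return [min_e] * (elems - full) + [max_e] * full
-- ===== Notes on version B (the rewrite author's own statement) =====
-- stated objective: faster
-- what changed: Replaces the +256 bump loop and the per-element greedy subtraction loop by a closed-form ceiling-division bump and a single divmod that builds the result as replicated blocks [min_e]*k + optional middle + [max_e]*full.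
import Mathlib
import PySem

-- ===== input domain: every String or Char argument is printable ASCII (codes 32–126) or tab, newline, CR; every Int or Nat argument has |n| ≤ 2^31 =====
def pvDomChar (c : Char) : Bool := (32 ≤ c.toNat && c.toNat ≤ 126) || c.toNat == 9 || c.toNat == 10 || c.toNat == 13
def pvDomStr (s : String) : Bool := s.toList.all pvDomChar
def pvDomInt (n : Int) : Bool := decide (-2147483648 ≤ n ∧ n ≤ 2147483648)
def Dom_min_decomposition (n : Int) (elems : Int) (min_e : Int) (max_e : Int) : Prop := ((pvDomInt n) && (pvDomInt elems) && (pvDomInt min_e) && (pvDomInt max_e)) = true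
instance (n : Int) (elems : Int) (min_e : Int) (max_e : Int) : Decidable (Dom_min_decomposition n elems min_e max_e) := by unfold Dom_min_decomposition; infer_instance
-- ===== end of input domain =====

-- B replaces A's +256 bump loop and per-element greedy loop by a closed-form
-- ceiling-division bump plus one divmod that emits the result as replicated blocks.

-- ===== PORT A =====
-- the 'while remaining < min_e * elems: remaining += 2**8' loop of A
def pvBumpA (remaining low : Int) : Int :=
  if remaining < low then pvBumpA (remaining + 256) low else remaining
termination_by (low - remaining).toNat
decreasing_by omega

def min_decomposition (n : Int) (elems : Int) (min_e : Int) (max_e : Int) : Option (List Int) :=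
  let remaining := pvBumpA n (min_e * elems)
  let st := (PySem.List.pyRange (elems - 1) (-1) (-1)).foldl
      (fun (st : List Int × Int) e =>
        let v := min max_e (st.2 - e * min_e)
        (st.1 ++ [v], st.2 - v)) ([], remaining)
  if st.2 > 0 then none else some st.1.reverse

-- ===== PORT B =====
def min_decomposition_alt (n : Int) (elems : Int) (min_e : Int) (max_e : Int) : Option (List Int) :=
  let low := min_e * elems
  let r := if n ≥ low then n else n + 256 * (PySem.Int.floordiv (low - n + 255) 256)
  if elems ≤ 0 then (if r ≤ 0 then some [] else none)
  else
    let excess := r - low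
    let cap := max_e - min_e
    if cap < 0 then none
    else if cap = 0 then (if excess = 0 then some (List.replicate elems.toNat min_e) else none)
    else if excess > cap * elems then none
    else
      let full := PySem.Int.floordiv excess cap
      let rem := PySem.Int.mod excess cap
      if rem > 0 then
        some (List.replicate (elems - full - 1).toNat min_e ++ [min_e + rem] ++ List.replicate full.toNat max_e)
      else
        some (List.replicate (elems - full).toNat min_e ++ List.replicate full.toNat max_e)

-- ===== PRECONDITION & SPEC =====
def Spec_min_decomposition (n : Int) (elems : Int) (min_e : Int) (max_e : Int) (out : Option (List Int)) : Prop := out = min_decomposition_alt n elems min_e max_e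
instance (n : Int) (elems : Int) (min_e : Int) (max_e : Int) (out : Option (List Int)) : Decidable (Spec_min_decomposition n elems min_e max_e out) := by unfold Spec_min_decomposition; infer_instance

-- ===== CLAIM (what is proved, stated in full; the proofs are below) =====
def Claim_equal_min_decomposition : Prop := ∀ (n : Int) (elems : Int) (min_e : Int) (max_e : Int), Dom_min_decomposition n elems min_e max_e → Spec_min_decomposition n elems min_e max_e (min_decomposition n elems min_e max_e)

-- ===== LEMMAS AND PROOFS =====

-- A's loop body, named for the proofs (definitionally the lambda in the port)
def pvLoop (min_e max_e : Int) : List Int × Int → Int → List Int × Int :=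
  fun st e =>
    let v := min max_e (st.2 - e * min_e)
    (st.1 ++ [v], st.2 - v)

lemma pvBumpA_lt : ∀ (k : Nat) (n low : Int), (low - n).toNat = k → n < low →
    pvBumpA n low = n + 256 * ((low - n + 255) / 256) := by
  intro k
  induction k using Nat.strong_induction_on with
  | _ k ih =>
    intro n low hk h
    rw [pvBumpA, if_pos h]
    by_cases h2 : n + 256 < low
    · rw [ih ((low - (n + 256)).toNat) (by omega) _ _ rfl h2]
      omega
    · rw [pvBumpA, if_neg h2]
      omega

lemma pvBumpA_eq (n low : Int) :
    pvBumpA n low = if low ≤ n then n else n + 256 * ((low - n + 255) / 256) := by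
  by_cases h : low ≤ n
  · rw [pvBumpA, if_neg (by omega), if_pos h]
  · rw [pvBumpA_lt (low - n).toNat n low rfl (by omega), if_neg h]

lemma pvBumpA_ge (n low : Int) : low ≤ pvBumpA n low := by
  rw [pvBumpA_eq]; split_ifs with h
  · exact h
  · omega

lemma pvLoop_prefix (min_e max_e : Int) (es : List Int) (p : List Int) (R : Int) :
    es.foldl (pvLoop min_e max_e) (p, R) =
      (p ++ (es.foldl (pvLoop min_e max_e) ([], R)).1,
       (es.foldl (pvLoop min_e max_e) ([], R)).2) := by
  induction es generalizing p R with
  | nil => simp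
  | cons e es ih =>
    simp only [List.foldl_cons, pvLoop, List.nil_append]
    rw [ih, ih [min max_e (R - e * min_e)]]
    simp

lemma pvRange_succ (m : Nat) :
    PySem.List.pyRange ((m : Int) + 1 - 1) (-1) (-1) =
      (m : Int) :: PySem.List.pyRange ((m : Int) - 1) (-1) (-1) := by
  have h : (-1 : Int) < (m : Int) + 1 - 1 := by omega
  rw [show ((m : Int) + 1 - 1) = (m : Int) by ring] at *
  rw [PySem.List.pyRange_neg_one_cons h]

-- one step of A's countdown loop, stated on the element count m
lemma pvStep (min_e max_e : Int) (m : Nat) (R : Int) :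
    (PySem.List.pyRange (((m : Int) + 1) - 1) (-1) (-1)).foldl (pvLoop min_e max_e) ([], R) =
      (min max_e (R - m * min_e) ::
        ((PySem.List.pyRange ((m : Int) - 1) (-1) (-1)).foldl (pvLoop min_e max_e)
          ([], R - min max_e (R - m * min_e))).1,
       ((PySem.List.pyRange ((m : Int) - 1) (-1) (-1)).foldl (pvLoop min_e max_e)
          ([], R - min max_e (R - m * min_e))).2) := by
  rw [pvRange_succ, List.foldl_cons]
  have : pvLoop min_e max_e ([], R) (m : Int) =
      ([min max_e (R - m * min_e)], R - min max_e (R - m * min_e)) := rfl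
  rw [this, pvLoop_prefix]
  simp

-- leftover characterization: final remaining = max 0 (excess - cap*m)
lemma pvSnd (min_e max_e : Int) (m : Nat) (excess : Int) (hx : 0 ≤ excess) :
    ((PySem.List.pyRange ((m : Int) - 1) (-1) (-1)).foldl (pvLoop min_e max_e)
        ([], min_e * m + excess)).2 = max 0 (excess - (max_e - min_e) * m) := by
  induction m generalizing excess with
  | zero =>
    rw [PySem.List.pyRange_neg_one_eq_nil (by omega)]
    simp; omega
  | succ m ih =>
    rw [show ((m + 1 : Nat) : Int) = (m : Int) + 1 from by push_cast; ring]
    rw [pvStep min_e max_e m (min_e * ((m : Int) + 1) + excess)]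
    have hv : min_e * ((m : Int) + 1) + excess - (m : Int) * min_e =
        min_e + excess := by ring
    rw [hv]
    set cap := max_e - min_e with hcap
    by_cases hc : cap ≤ excess
    · have hmin : min max_e (min_e + excess) = max_e := by
        apply min_eq_left; omega
      rw [hmin]
      have hR2 : min_e * ((m : Int) + 1) + excess - max_e = min_e * m + (excess - cap) := by
        rw [hcap]; ring
      rw [hR2, ih (excess - cap) (by omega)]
      have : cap * ((m : Int) + 1) = cap * m + cap := by ring
      omega
    · have hmin : min max_e (min_e + excess) = min_e + excess := by
        apply min_eq_right; omega
      rw [hmin]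
      have hR2 : min_e * ((m : Int) + 1) + excess - (min_e + excess) = min_e * m + 0 := by ring
      rw [hR2, ih 0 le_rfl]
      have hcm : 0 ≤ cap * (m : Int) := mul_nonneg (by omega) (by positivity)
      have : cap * ((m : Int) + 1) = cap * m + cap := by ring
      omega

-- all-min_e case: excess = 0, cap ≥ 0
lemma pvFstZero (min_e max_e : Int) (hc : min_e ≤ max_e) (m : Nat) :
    ((PySem.List.pyRange ((m : Int) - 1) (-1) (-1)).foldl (pvLoop min_e max_e)
        ([], min_e * m)).1 = List.replicate m min_e := by
  induction m with
  | zero => rw [PySem.List.pyRange_neg_one_eq_nil (by omega)]; simp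
  | succ m ih =>
    rw [show ((m + 1 : Nat) : Int) = (m : Int) + 1 from by push_cast; ring]
    rw [show min_e * ((m : Int) + 1) = min_e * ((m : Int) + 1) + 0 from by ring]
    rw [pvStep]
    have hv : min_e * ((m : Int) + 1) + 0 - (m : Int) * min_e = min_e + 0 := by ring
    rw [hv]
    have hmin : min max_e (min_e + 0) = min_e := by rw [add_zero]; exact min_eq_right hc
    rw [hmin]
    have hR2 : min_e * ((m : Int) + 1) + 0 - min_e = min_e * m := by ring
    rw [hR2, ih]
    simp [List.replicate_succ]

-- result characterization for cap > 0, 0 ≤ excess ≤ cap * m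
lemma pvFst (min_e max_e : Int) (hc : min_e < max_e) (m : Nat) (excess : Int)
    (hx : 0 ≤ excess) (hub : excess ≤ (max_e - min_e) * m) :
    ((PySem.List.pyRange ((m : Int) - 1) (-1) (-1)).foldl (pvLoop min_e max_e)
        ([], min_e * m + excess)).1 =
      List.replicate (excess / (max_e - min_e)).toNat max_e ++
        (if excess % (max_e - min_e) > 0 then [min_e + excess % (max_e - min_e)] else []) ++
        List.replicate ((m : Int) - excess / (max_e - min_e) -
          (if excess % (max_e - min_e) > 0 then 1 else 0)).toNat min_e := by
  induction m generalizing excess with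
  | zero =>
    have hx0 : excess = 0 := by simpa using le_antisymm (by simpa using hub) hx
    subst hx0
    rw [PySem.List.pyRange_neg_one_eq_nil (by omega)]
    simp
  | succ m ih =>
    set cap := max_e - min_e with hcap
    have hcap0 : 0 < cap := by omega
    rw [show ((m + 1 : Nat) : Int) = (m : Int) + 1 from by push_cast; ring] at hub ⊢
    rw [pvStep]
    have hv : min_e * ((m : Int) + 1) + excess - (m : Int) * min_e = min_e + excess := by ring
    rw [hv]
    by_cases hce : cap ≤ excess
    · -- take max_e, recurse on excess - cap
      have hmin : min max_e (min_e + excess) = max_e := by apply min_eq_left; omega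
      rw [hmin]
      have hR2 : min_e * ((m : Int) + 1) + excess - max_e = min_e * m + (excess - cap) := by
        rw [hcap]; ring
      have hub' : excess - cap ≤ cap * m := by
        have : cap * ((m : Int) + 1) = cap * m + cap := by ring
        omega
      rw [hR2, ih (excess - cap) (by omega) hub']
      have hdiv : (excess - cap) / cap = excess / cap - 1 := by
        have := Int.add_mul_ediv_right excess (-1) (by omega : cap ≠ 0)
        simpa [sub_eq_add_neg, neg_mul] using this
      have hmod : (excess - cap) % cap = excess % cap := by
        conv_rhs => rw [show excess = (excess - cap) + cap * 1 by ring]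
        rw [Int.add_mul_emod_self_left]
      rw [hdiv, hmod]
      have hfull1 : 1 ≤ excess / cap := by
        rw [Int.le_ediv_iff_mul_le hcap0]; omega
      have ht : (excess / cap).toNat = (excess / cap - 1).toNat + 1 := by omega
      rw [ht, List.replicate_succ]
      have hrep : ((m : Int) - (excess / cap - 1) - (if excess % cap > 0 then 1 else 0)).toNat
          = (((m : Int) + 1) - excess / cap - (if excess % cap > 0 then 1 else 0)).toNat := by
        congr 1; ring
      rw [hrep]
      simp
    · -- take min_e + excess, rest are min_e
      have hmin : min max_e (min_e + excess) = min_e + excess := by apply min_eq_right; omega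
      rw [hmin]
      have hR2 : min_e * ((m : Int) + 1) + excess - (min_e + excess) = min_e * m := by ring
      rw [hR2, pvFstZero min_e max_e (by omega) m]
      have hdiv : excess / cap = 0 := Int.ediv_eq_zero_of_lt hx (by omega)
      have hmod : excess % cap = excess := Int.emod_eq_of_lt hx (by omega)
      rw [hdiv, hmod]
      by_cases hx0 : 0 < excess
      · rw [if_pos hx0, if_pos hx0]
        have : ((m : Int) + 1 - 0 - 1).toNat = m := by omega
        rw [this]
        try simp
      · have hx0' : excess = 0 := by omega
        subst hx0'
        simp [List.replicate_succ]

lemma pvRange_nil_of_nonpos (elems : Int) (h : elems ≤ 0) :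
    PySem.List.pyRange (elems - 1) (-1) (-1) = [] :=
  PySem.List.pyRange_neg_one_eq_nil (by omega)

theorem pv_main (n elems min_e max_e : Int) :
    min_decomposition n elems min_e max_e = min_decomposition_alt n elems min_e max_e := by
  simp only [min_decomposition, min_decomposition_alt]
  have hr : pvBumpA n (min_e * elems) =
      (if n ≥ min_e * elems then n
       else n + 256 * PySem.Int.floordiv (min_e * elems - n + 255) 256) := by
    rw [pvBumpA_eq]
    rw [PySem.Int.floordiv_eq_ediv_of_pos (by norm_num)]
  rw [hr]
  set r := (if n ≥ min_e * elems then n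
            else n + 256 * PySem.Int.floordiv (min_e * elems - n + 255) 256) with hrdef
  have hrge : min_e * elems ≤ r := by rw [← hr]; exact pvBumpA_ge n (min_e * elems)
  by_cases he : elems ≤ 0
  · rw [if_pos he, pvRange_nil_of_nonpos elems he]
    simp only [List.foldl_nil]
    split_ifs with h1 h2 h2 <;> first | rfl | omega
  · rw [if_neg he]
    set m : Nat := elems.toNat with hm
    have hme : (m : Int) = elems := by omega
    set excess := r - min_e * elems with hex
    have hx : 0 ≤ excess := by omega
    have hRm : r = min_e * m + excess := by rw [hme]; omega
    have hfold : (PySem.List.pyRange (elems - 1) (-1) (-1)).foldl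
        (fun (st : List Int × Int) e =>
          let v := min max_e (st.2 - e * min_e)
          (st.1 ++ [v], st.2 - v)) ([], r)
        = (PySem.List.pyRange ((m : Int) - 1) (-1) (-1)).foldl (pvLoop min_e max_e)
            ([], min_e * m + excess) := by
      rw [show min_e * (m : Int) + excess = r from by rw [hme]; omega, hme]
      rfl
    rw [hfold]
    by_cases hc : max_e - min_e < 0
    · rw [if_pos hc, pvSnd min_e max_e m excess hx]
      have hmul : (max_e - min_e) * (m : Int) < 0 :=
        mul_neg_of_neg_of_pos hc (by omega)
      rw [if_pos (by omega : max 0 (excess - (max_e - min_e) * (m : Int)) > 0)]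
    · rw [if_neg hc]
      by_cases hc0 : max_e - min_e = 0
      · rw [if_pos hc0]
        by_cases hx0 : excess = 0
        · rw [if_pos hx0, hx0, add_zero]
          have hsnd := pvSnd min_e max_e m 0 le_rfl
          rw [add_zero] at hsnd
          have hv : max 0 ((0 : Int) - (max_e - min_e) * (m : Int)) = 0 := by
            rw [hc0]; simp
          rw [hsnd, hv]
          simp [pvFstZero min_e max_e (by omega : min_e ≤ max_e) m]
        · rw [if_neg hx0, pvSnd min_e max_e m excess hx]
          rw [if_pos (by rw [hc0]; simp; omega :
            max 0 (excess - (max_e - min_e) * (m : Int)) > 0)]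
      · rw [if_neg hc0]
        have hcpos : 0 < max_e - min_e := by omega
        by_cases hub : excess > (max_e - min_e) * elems
        · rw [if_pos hub, pvSnd min_e max_e m excess hx]
          rw [← hme] at hub
          rw [if_pos (by omega : max 0 (excess - (max_e - min_e) * (m : Int)) > 0)]
        · rw [if_neg hub]
          rw [← hme] at hub
          have hub' : excess ≤ (max_e - min_e) * (m : Int) := by omega
          rw [pvSnd min_e max_e m excess hx,
              pvFst min_e max_e (by omega) m excess hx hub']
          rw [if_neg (by omega : ¬ max 0 (excess - (max_e - min_e) * (m : Int)) > 0)]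
          rw [PySem.Int.floordiv_eq_ediv_of_pos hcpos, PySem.Int.mod_eq_emod_of_pos hcpos]
          rw [← hme]
          by_cases hr0 : excess % (max_e - min_e) > 0
          · rw [if_pos hr0, if_pos hr0, if_pos hr0]
            simp [List.reverse_append, List.append_assoc]
          · rw [if_neg hr0, if_neg hr0, if_neg hr0]
            simp [List.reverse_append]

-- ===== VERDICT (by name: the statement is the Claim_ definition above) =====
theorem min_decomposition_spec : Claim_equal_min_decomposition := by
  intro n elems min_e max_e _
  unfold Spec_min_decomposition
  exact pv_main n elems min_e max_e
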